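-- pv_equiv track=rewrite | github.com/ruipinto2025/mlflow-fastapi-docker | src/mlflow_fastapi_docker/generate_dataset.py | decision_layer
-- ===== SOURCE A (Python) =====
-- from typing import Any
--
-- ANOMALY_DETAILS_MAP: dict[str, dict[str, Any]] = {
--     "Motor Overcurrent": {
--         "severity_label": "Critical",
--         "action": "Stop immediately to prevent damage and collisions. Reduce operation intensity and analyze whether system configuration adjustments are needed",
--         "explanation": "Current spikes outside the normal range characterize a critical overload.",
--     },
--     "Motor Overheating": {
--         "severity_label": "Critical",
--         "action": "Activate the cooling protocol",
--         "explanation": "Temperature has exceeded the normal value, indicating overheating.",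
--     },
--     "Anomalous Motor Position": {
--         "severity_label": "Critical",
--         "action": "Stop immediately to prevent damage and collisions. Reduce operation intensity and analyze whether system configuration adjustments are needed",
--         "explanation": "The motor position is outside the normal range, possibly due to excessive speed.",
--     },
--     "High Speed Operation": {
--         "severity_label": "Critical",
--         "action": "Stop immediately to prevent damage and collisions. Reduce operation intensity and analyze whether system configuration adjustments are needed",
--         "explanation": "Speed exceeds the normal limit, suggesting a possible malfunction or control failure.",
--     },
--     "Abnormal Motor Torque": {
--         "severity_label": "Critical",
--         "action": "Stop immediately to prevent damage and collisions. Reduce operation intensity and analyze whether system configuration adjustments are needed",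
--         "explanation": "The force applied to the motor is outside the normal range.",
--     },
--     "High Vibration": {
--         "severity_label": "High",
--         "action": "Perform a mechanical inspection of the crane; check for wear and angular alignment",
--         "explanation": "Vibration angles deviate significantly from normal values, indicating high vibration.",
--     },
--     "Abnormal Power Variation": {
--         "severity_label": "Medium",
--         "action": "Stop immediately to prevent damage and collisions. Reduce operation intensity and analyze whether system configuration adjustments are needed",
--         "explanation": "Motor power is outside its normal values.",
--     },
-- }
--
-- def decision_layer(anomaly_labels: list[str]) -> list[dict[str, Any]]:
--     """
--     Prioritize anomalies based on the following order:
--       1. Motor Overcurrent (Critical)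
--       2. Motor Overheating (Critical)
--       3. Anomalous Motor Position (Critical)
--       4. High Speed Operation (Critical)
--       5. Abnormal Motor Torque (Critical)
--       6. High Vibration (High)
--       7. Abnormal Power Variation (Medium)
--
--     Returns a list with a single dictionary containing details for the highest priority anomaly.
--     """
--
--     priority_order = [
--         "Motor Overcurrent",
--         "Motor Overheating",
--         "Anomalous Motor Position",
--         "High Speed Operation",
--         "Abnormal Motor Torque",
--         "High Vibration",
--         "Abnormal Power Variation",
--     ]
--
--     for anomaly_type in priority_order:
--         matching = [label for label in anomaly_labels if anomaly_type in label]
--         if matching: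
--             info = ANOMALY_DETAILS_MAP[anomaly_type]
--             return [
--                 {
--                     "anomaly": matching[0],
--                     "severity": info["severity_label"],
--                     "action": info["action"],
--                     "explanation": info["explanation"],
--                 }
--             ]
--     return []
-- ===== SOURCE B (Python) =====
-- from typing import Any
--
-- # Fused priority table: (anomaly type, severity, action, explanation) in priority order.
-- PRIORITY_TABLE: list[tuple[str, str, str, str]] = [
--     ("Motor Overcurrent", "Critical",
--      "Stop immediately to prevent damage and collisions. Reduce operation intensity and analyze whether system configuration adjustments are needed",
--      "Current spikes outside the normal range characterize a critical overload."),
--     ("Motor Overheating", "Critical",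
--      "Activate the cooling protocol",
--      "Temperature has exceeded the normal value, indicating overheating."),
--     ("Anomalous Motor Position", "Critical",
--      "Stop immediately to prevent damage and collisions. Reduce operation intensity and analyze whether system configuration adjustments are needed",
--      "The motor position is outside the normal range, possibly due to excessive speed."),
--     ("High Speed Operation", "Critical",
--      "Stop immediately to prevent damage and collisions. Reduce operation intensity and analyze whether system configuration adjustments are needed",
--      "Speed exceeds the normal limit, suggesting a possible malfunction or control failure."),
--     ("Abnormal Motor Torque", "Critical",
--      "Stop immediately to prevent damage and collisions. Reduce operation intensity and analyze whether system configuration adjustments are needed",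
--      "The force applied to the motor is outside the normal range."),
--     ("High Vibration", "High",
--      "Perform a mechanical inspection of the crane; check for wear and angular alignment",
--      "Vibration angles deviate significantly from normal values, indicating high vibration."),
--     ("Abnormal Power Variation", "Medium",
--      "Stop immediately to prevent damage and collisions. Reduce operation intensity and analyze whether system configuration adjustments are needed",
--      "Motor power is outside its normal values."),
-- ]
--
--
-- def decision_layer(anomaly_labels: list[str]) -> list[dict[str, Any]]:
--     """Single pass over anomaly_labels keeping a shrinking priority bound:
--     each label is only scanned against priorities strictly better than the
--     current best, so the first label (in list order) to reach each best wins."""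
--     best_i = len(PRIORITY_TABLE)
--     best_label = None
--     for label in anomaly_labels:
--         for i in range(best_i):
--             if PRIORITY_TABLE[i][0] in label:
--                 best_i, best_label = i, label
--                 break
--     if best_label is None:
--         return []
--     _, severity, action, explanation = PRIORITY_TABLE[best_i]
--     return [
--         {
--             "anomaly": best_label,
--             "severity": severity,
--             "action": action,
--             "explanation": explanation,
--         }
--     ]
-- ===== Notes on version B (the rewrite author's own statement) =====
-- stated objective: alternative
-- what changed: Replaced A's priority-major loop (one filter pass over the labels per priority type) by a single pass over anomaly_labels with a fused (type, severity, action, explanation) table and a shrinking priority bound: each label is scanned only against priorities strictly better than the current best, so the first label in list order wins ties.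
import Mathlib
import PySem

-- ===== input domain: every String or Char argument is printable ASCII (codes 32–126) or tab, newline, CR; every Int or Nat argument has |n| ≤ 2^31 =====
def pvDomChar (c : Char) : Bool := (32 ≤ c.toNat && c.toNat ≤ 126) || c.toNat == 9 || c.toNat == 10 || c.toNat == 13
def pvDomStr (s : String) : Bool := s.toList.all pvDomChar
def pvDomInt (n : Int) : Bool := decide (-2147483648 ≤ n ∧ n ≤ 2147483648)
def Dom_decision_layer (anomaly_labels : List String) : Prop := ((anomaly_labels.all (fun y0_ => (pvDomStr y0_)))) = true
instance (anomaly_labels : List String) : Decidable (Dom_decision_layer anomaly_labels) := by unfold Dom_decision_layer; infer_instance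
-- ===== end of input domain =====

-- B replaces A's priority-major double scan (filter the labels once per priority type) by a single
-- pass over the labels with a fused priority table and a shrinking priority bound; objective: alternative decomposition.

-- ===== PORT A =====
-- module constant ANOMALY_DETAILS_MAP, values as (severity_label, action, explanation)
def anomalyDetailsMap : PySem.Dict String (String × String × String) := PySem.Dict.mk
  [ ("Motor Overcurrent", ("Critical", "Stop immediately to prevent damage and collisions. Reduce operation intensity and analyze whether system configuration adjustments are needed", "Current spikes outside the normal range characterize a critical overload."))
  , ("Motor Overheating", ("Critical", "Activate the cooling protocol", "Temperature has exceeded the normal value, indicating overheating."))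
  , ("Anomalous Motor Position", ("Critical", "Stop immediately to prevent damage and collisions. Reduce operation intensity and analyze whether system configuration adjustments are needed", "The motor position is outside the normal range, possibly due to excessive speed."))
  , ("High Speed Operation", ("Critical", "Stop immediately to prevent damage and collisions. Reduce operation intensity and analyze whether system configuration adjustments are needed", "Speed exceeds the normal limit, suggesting a possible malfunction or control failure."))
  , ("Abnormal Motor Torque", ("Critical", "Stop immediately to prevent damage and collisions. Reduce operation intensity and analyze whether system configuration adjustments are needed", "The force applied to the motor is outside the normal range."))
  , ("High Vibration", ("High", "Perform a mechanical inspection of the crane; check for wear and angular alignment", "Vibration angles deviate significantly from normal values, indicating high vibration."))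
  , ("Abnormal Power Variation", ("Medium", "Stop immediately to prevent damage and collisions. Reduce operation intensity and analyze whether system configuration adjustments are needed", "Motor power is outside its normal values."))
  ]

def priorityOrder : List String :=
  [ "Motor Overcurrent", "Motor Overheating", "Anomalous Motor Position"
  , "High Speed Operation", "Abnormal Motor Torque", "High Vibration", "Abnormal Power Variation" ]

-- ANOMALY_DETAILS_MAP[t]: key t is always present when looked up, so getD is exact (no KeyError possible)
def anomalyEntry (t label : String) : List (List (String × String)) :=
  let info := anomalyDetailsMap.getD t ("", "", "")
  [[("anomaly", label), ("severity", info.1), ("action", info.2.1), ("explanation", info.2.2)]]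

-- 'for anomaly_type in priority_order: matching = [label for label in anomaly_labels if anomaly_type in label]; if matching: return …'
def decisionGoA (anomaly_labels : List String) : List String → List (List (String × String))
  | [] => []
  | anomaly_type :: rest =>
    match anomaly_labels.filter (fun label => PySem.Str.isIn anomaly_type label) with
    | [] => decisionGoA anomaly_labels rest
    | m0 :: _ => anomalyEntry anomaly_type m0

def decision_layer (anomaly_labels : List String) : List (List (String × String)) :=
  decisionGoA anomaly_labels priorityOrder

-- ===== PORT B =====
-- B's module constant PRIORITY_TABLE: (anomaly type, severity, action, explanation) in priority order
def priorityTable : List (String × String × String × String) :=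
  [ ("Motor Overcurrent", "Critical", "Stop immediately to prevent damage and collisions. Reduce operation intensity and analyze whether system configuration adjustments are needed", "Current spikes outside the normal range characterize a critical overload.")
  , ("Motor Overheating", "Critical", "Activate the cooling protocol", "Temperature has exceeded the normal value, indicating overheating.")
  , ("Anomalous Motor Position", "Critical", "Stop immediately to prevent damage and collisions. Reduce operation intensity and analyze whether system configuration adjustments are needed", "The motor position is outside the normal range, possibly due to excessive speed.")
  , ("High Speed Operation", "Critical", "Stop immediately to prevent damage and collisions. Reduce operation intensity and analyze whether system configuration adjustments are needed", "Speed exceeds the normal limit, suggesting a possible malfunction or control failure.")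
  , ("Abnormal Motor Torque", "Critical", "Stop immediately to prevent damage and collisions. Reduce operation intensity and analyze whether system configuration adjustments are needed", "The force applied to the motor is outside the normal range.")
  , ("High Vibration", "High", "Perform a mechanical inspection of the crane; check for wear and angular alignment", "Vibration angles deviate significantly from normal values, indicating high vibration.")
  , ("Abnormal Power Variation", "Medium", "Stop immediately to prevent damage and collisions. Reduce operation intensity and analyze whether system configuration adjustments are needed", "Motor power is outside its normal values.")
  ]

-- 'for i in range(bound): if PRIORITY_TABLE[i][0] in label: …' — first absolute index i < bound matching
def scanB : List (String × String × String × String) → Nat → String → Option Nat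
  | _, 0, _ => none
  | [], _ + 1, _ => none
  | e :: rest, b + 1, label =>
    if PySem.Str.isIn e.1 label then some 0 else (scanB rest b label).map (· + 1)

-- B's outer loop: state (best_i, best_label), bound shrinks on each improvement
def loopB (tbl : List (String × String × String × String)) :
    List String → Nat → Option String → Nat × Option String
  | [], b, lab => (b, lab)
  | l :: ls, b, lab =>
    match scanB tbl b l with
    | some i => loopB tbl ls i (some l)
    | none => loopB tbl ls b lab

def decision_layer_alt (anomaly_labels : List String) : List (List (String × String)) :=
  match loopB priorityTable anomaly_labels priorityTable.length none with
  | (_, none) => []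
  | (bi, some label) =>
    let e := priorityTable.getD bi ("", "", "", "")
    [[("anomaly", label), ("severity", e.2.1), ("action", e.2.2.1), ("explanation", e.2.2.2)]]

-- ===== PRECONDITION & SPEC =====
def Spec_decision_layer (anomaly_labels : List String) (out : List (List (String × String))) : Prop := out = decision_layer_alt anomaly_labels
instance (anomaly_labels : List String) (out : List (List (String × String))) : Decidable (Spec_decision_layer anomaly_labels out) := by unfold Spec_decision_layer; infer_instance

-- ===== CLAIM (what is proved, stated in full; the proofs are below) =====
def Claim_equal_decision_layer : Prop := ∀ (anomaly_labels : List String), Dom_decision_layer anomaly_labels → Spec_decision_layer anomaly_labels (decision_layer anomaly_labels)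

-- ===== LEMMAS AND PROOFS =====

def renderB (tbl : List (String × String × String × String)) :
    Nat × Option String → List (List (String × String))
  | (_, none) => []
  | (bi, some label) =>
    let e := tbl.getD bi ("", "", "", "")
    [[("anomaly", label), ("severity", e.2.1), ("action", e.2.2.1), ("explanation", e.2.2.2)]]

-- if no label matches the head type, the whole loop on t :: rest is the loop on rest with the bound shifted by one
lemma loopB_shift (t : String × String × String × String)
    (rest : List (String × String × String × String)) (labels : List String)
    (b : Nat) (lab : Option String)
    (hnone : ∀ l ∈ labels, PySem.Str.isIn t.1 l = false) :
    loopB (t :: rest) labels (b + 1) lab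
      = ((loopB rest labels b lab).1 + 1, (loopB rest labels b lab).2) := by
  induction labels generalizing b lab with
  | nil => rfl
  | cons l ls ih =>
    have hl : PySem.Str.isIn t.1 l = false := hnone l (List.mem_cons_self)
    have hrec : ∀ x ∈ ls, PySem.Str.isIn t.1 x = false :=
      fun x hx => hnone x (List.mem_cons_of_mem _ hx)
    simp only [loopB, scanB, hl, Bool.false_eq_true, if_false]
    cases hsc : scanB rest b l with
    | none => simpa [hsc] using ih b lab hrec
    | some i => simpa [hsc] using ih i (some l) hrec

-- once the state is (0, some m), no later label can improve it
lemma loopB_zero (tbl : List (String × String × String × String))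
    (labels : List String) (m : String) :
    loopB tbl labels 0 (some m) = (0, some m) := by
  induction labels with
  | nil => rfl
  | cons l ls ih =>
    have : scanB tbl 0 l = none := by cases tbl <;> rfl
    simpa [loopB, this] using ih

-- if some label matches the head type (filter = m0 :: _) and the bound is still ≥ 1,
-- the loop ends in state (0, first matching label)
lemma loopB_found (t : String × String × String × String)
    (rest : List (String × String × String × String)) (labels : List String)
    (b : Nat) (lab : Option String) (m0 : String) (ms : List String)
    (hf : labels.filter (fun label => PySem.Str.isIn t.1 label) = m0 :: ms) :
    loopB (t :: rest) labels (b + 1) lab = (0, some m0) := by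
  induction labels generalizing b lab ms with
  | nil => simp at hf
  | cons l ls ih =>
    by_cases h : PySem.Str.isIn t.1 l
    · have hm0 : m0 = l := by
        rw [List.filter_cons, if_pos (by simpa using h)] at hf
        injection hf with h1 _
        exact h1.symm
      simp only [loopB, scanB, h, if_pos]
      rw [hm0]
      exact loopB_zero _ _ _
    · have hf' : ls.filter (fun label => PySem.Str.isIn t.1 label) = m0 :: ms := by
        rwa [List.filter_cons, if_neg (by simpa using h)] at hf
      simp only [loopB, scanB, h, Bool.false_eq_true, if_false]
      cases hsc : scanB rest b l with
      | none => simpa [hsc] using ih b lab ms hf'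
      | some i =>
        simp only [hsc, Option.map_some]
        exact ih i (some l) ms hf'

-- A on the keys of a table equals B's loop on that table, whenever A's dict agrees with the table rows
lemma main_lemma (tbl : List (String × String × String × String)) (labels : List String)
    (hmap : ∀ e ∈ tbl, anomalyDetailsMap.getD e.1 ("", "", "") = (e.2.1, e.2.2.1, e.2.2.2)) :
    decisionGoA labels (tbl.map (·.1))
      = renderB tbl (loopB tbl labels tbl.length none) := by
  induction tbl with
  | nil =>
    have : loopB [] labels 0 none = (0, none) := by
      induction labels with
      | nil => rfl
      | cons l ls ih => simpa [loopB, scanB] using ih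
    simp [decisionGoA, renderB, this]
  | cons t rest ih =>
    by_cases h : ∀ l ∈ labels, PySem.Str.isIn t.1 l = false
    · have hfil : labels.filter (fun label => PySem.Str.isIn t.1 label) = [] := by
        simp only [List.filter_eq_nil_iff]
        intro a ha; rw [h a ha]; simp
      have hshift := loopB_shift t rest labels rest.length none h
      simp only [List.map_cons, decisionGoA, hfil, List.length_cons, hshift]
      rw [ih (fun e he => hmap e (List.mem_cons_of_mem _ he))]
      cases hres : loopB rest labels rest.length none with
      | mk bi lab =>
        cases lab with
        | none => rfl
        | some m => simp [renderB]
    · simp only [not_forall, Bool.not_eq_false] at h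
      obtain ⟨l0, hl0, hl0t⟩ := h
      have hne : labels.filter (fun label => PySem.Str.isIn t.1 label) ≠ [] := by
        simp only [ne_eq, List.filter_eq_nil_iff]
        intro hc
        exact (hc l0 hl0) (by simpa using hl0t)
      obtain ⟨m0, ms, hf⟩ := List.exists_cons_of_ne_nil hne
      have hfound := loopB_found t rest labels rest.length none m0 ms hf
      simp only [List.map_cons, decisionGoA, hf, List.length_cons, hfound]
      have := hmap t (List.mem_cons_self)
      simp [renderB, anomalyEntry, this]

-- ===== VERDICT (by name: the statement is the Claim_ definition above) =====
theorem decision_layer_spec : Claim_equal_decision_layer := by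
  intro labels _
  unfold Spec_decision_layer decision_layer decision_layer_alt
  have hkeys : priorityOrder = priorityTable.map (·.1) := rfl
  rw [hkeys, main_lemma priorityTable labels (by intro e he; fin_cases he <;> rfl)]
  cases loopB priorityTable labels priorityTable.length none with
  | mk bi lab => cases lab <;> rfl
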